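-- pv_equiv track=rewrite | github.com/parthmishra1996/Pacman_AI | program0/submission.py | findSingletonWords
-- ===== SOURCE A (Python) =====
-- def findSingletonWords(text):
--     """
--     Splits the string |text| by whitespace and returns the set of words that
--     occur exactly once.
--     If no singleton words exist return the emptyset.
--     """
--     "*** YOUR CODE HERE ***"
--     # BEGIN_YOUR_CODE (our solution is 4 lines of code, but don't worry if you deviate from this)
--     text = text.strip().split()
--     mappy = {}
--
--     for x in text:
--         if x in mappy:
--             mappy[x] = mappy[x] + 1
--         else:
--             mappy[x] = 1
--
--     single_word = set()
--
--     for i in mappy: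
--         if mappy[i] == 1:
--             single_word.add(i)
--
--     return single_word
-- ===== SOURCE B (Python) =====
-- def findSingletonWords(text):
--     seen_once = set()
--     seen_more = set()
--     for x in text.strip().split():
--         if x in seen_more:
--             pass
--         elif x in seen_once:
--             seen_once.discard(x)
--             seen_more.add(x)
--         else:
--             seen_once.add(x)
--     return seen_once
-- ===== Notes on version B (the rewrite author's own statement) =====
-- stated objective: simpler
-- what changed: Replaced the count-dict build plus a second filter pass with a single pass maintaining two sets (seen_once / seen_more); no integer counts and no second loop.
import Mathlib
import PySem

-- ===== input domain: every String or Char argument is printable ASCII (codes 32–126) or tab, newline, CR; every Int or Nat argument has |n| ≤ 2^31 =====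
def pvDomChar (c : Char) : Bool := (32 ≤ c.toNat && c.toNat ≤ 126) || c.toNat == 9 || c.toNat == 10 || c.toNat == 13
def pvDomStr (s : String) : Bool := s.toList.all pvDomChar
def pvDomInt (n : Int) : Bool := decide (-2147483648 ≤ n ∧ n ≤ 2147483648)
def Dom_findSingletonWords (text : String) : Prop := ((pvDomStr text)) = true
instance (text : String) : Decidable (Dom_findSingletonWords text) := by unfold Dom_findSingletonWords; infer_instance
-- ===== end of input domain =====

-- B replaces A's count-dict + second filter pass by a single pass maintaining two sets
-- (seen_once / seen_more); same return value, objective: simpler.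

-- ===== PORT A =====
def findSingletonWords (text : String) : List String :=
  let ws := PySem.Str.split₀ (PySem.Str.strip text)
  let mappy := ws.foldl
    (fun (d : PySem.Dict String Int) x =>
      if d.contains x then d.insert x (d.getD x 0 + 1) else d.insert x 1)
    PySem.Dict.empty
  mappy.keys.foldl
    (fun (s : PySem.Set String) i =>
      if mappy.getD i 0 == 1 then s.add i else s)
    PySem.Set.empty

-- ===== PORT B =====
def findSingletonWords_alt (text : String) : List String :=
  (((PySem.Str.split₀ (PySem.Str.strip text)).foldl
    (fun (st : PySem.Set String × PySem.Set String) x =>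
      if PySem.Set.contains st.2 x then st
      else if PySem.Set.contains st.1 x then (PySem.Set.discard st.1 x, PySem.Set.add st.2 x)
      else (PySem.Set.add st.1 x, st.2))
    (PySem.Set.empty, PySem.Set.empty))).1

-- ===== PRECONDITION & SPEC =====
def Spec_findSingletonWords (text : String) (out : List String) : Prop := out = findSingletonWords_alt text
instance (text : String) (out : List String) : Decidable (Spec_findSingletonWords text out) := by unfold Spec_findSingletonWords; infer_instance

-- ===== CLAIM (what is proved, stated in full; the proofs are below) =====
def Claim_equal_findSingletonWords : Prop := ∀ (text : String), Dom_findSingletonWords text → Spec_findSingletonWords text (findSingletonWords text)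

-- ===== LEMMAS AND PROOFS =====

-- A's counting step as a named function (definitionally the lambda in the port)
def pvStepA (d : PySem.Dict String Int) (x : String) : PySem.Dict String Int :=
  if d.contains x then d.insert x (d.getD x 0 + 1) else d.insert x 1

-- B's step as a named function (definitionally the lambda in the port)
def pvStepB (st : PySem.Set String × PySem.Set String) (x : String) :
    PySem.Set String × PySem.Set String :=
  if PySem.Set.contains st.2 x then st
  else if PySem.Set.contains st.1 x then (PySem.Set.discard st.1 x, PySem.Set.add st.2 x)
  else (PySem.Set.add st.1 x, st.2)

-- the relational invariant between A's dict and B's pair of sets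
def pvInv (d : PySem.Dict String Int) (so sm : PySem.Set String) : Prop :=
  d.keys.Nodup ∧
  so = d.keys.filter (fun k => d.getD k 0 == 1) ∧
  (∀ x, x ∈ sm ↔ x ∈ d.keys ∧ d.getD x 0 ≠ 1) ∧
  (∀ x, x ∈ d.keys → 1 ≤ d.getD x 0)

lemma pvInv_step (d : PySem.Dict String Int) (so sm : PySem.Set String) (x : String)
    (h : pvInv d so sm) :
    pvInv (pvStepA d x) (pvStepB (so, sm) x).1 (pvStepB (so, sm) x).2 := by
  obtain ⟨hnd, hso, hsm, hpos⟩ := h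
  by_cases hmem : x ∈ sm
  · -- x already seen at least twice: both sides unchanged (up to the count bump)
    have hk : x ∈ d.keys := ((hsm x).1 hmem).1
    have hne : d.getD x 0 ≠ 1 := ((hsm x).1 hmem).2
    have hge : 2 ≤ d.getD x 0 := by have := hpos x hk; omega
    have hc : d.contains x = true := (PySem.Dict.contains_iff_mem_keys d x).2 hk
    have hsmc : PySem.Set.contains sm x = true := (PySem.Set.contains_iff sm x).2 hmem
    have hB : pvStepB (so, sm) x = (so, sm) := by unfold pvStepB; simp [hmem]
    have hA : pvStepA d x = d.insert x (d.getD x 0 + 1) := by unfold pvStepA; simp [hc]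
    rw [hB, hA]
    have hkeys : (d.insert x (d.getD x 0 + 1)).keys = d.keys :=
      PySem.Dict.keys_insert_of_contains d _ hc
    refine ⟨by rw [hkeys]; exact hnd, ?_, ?_, ?_⟩
    · rw [hkeys, hso]
      apply List.filter_congr
      intro k hkmem
      rw [PySem.Dict.getD_insert]
      split_ifs with he
      · subst he; simp; omega
      · rfl
    · intro y
      rw [show ((so, sm) : PySem.Set String × PySem.Set String).2 = sm from rfl,
        hsm y, hkeys, PySem.Dict.getD_insert]
      split_ifs with he
      · subst he; constructor <;> (intro h'; exact ⟨hk, by omega⟩)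
      · rfl
    · intro y hy
      rw [hkeys] at hy
      rw [PySem.Dict.getD_insert]
      split_ifs with he
      · omega
      · exact hpos y hy
  · by_cases honce : x ∈ so
    · -- second occurrence: count was exactly 1
      have hk : x ∈ d.keys := by rw [hso] at honce; exact (List.mem_filter.1 honce).1
      have heq1 : d.getD x 0 = 1 := by
        rw [hso] at honce
        have := (List.mem_filter.1 honce).2; simpa using this
      have hc : d.contains x = true := (PySem.Dict.contains_iff_mem_keys d x).2 hk
      have hsmc : PySem.Set.contains sm x = false := by
        rw [← Bool.not_eq_true, (PySem.Set.contains_iff sm x)]; exact hmem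
      have hsoc : PySem.Set.contains so x = true := (PySem.Set.contains_iff so x).2 honce
      have hB : pvStepB (so, sm) x = (PySem.Set.discard so x, PySem.Set.add sm x) := by
        unfold pvStepB; simp [hmem, honce]
      have hA : pvStepA d x = d.insert x (d.getD x 0 + 1) := by unfold pvStepA; simp [hc]
      rw [hB, hA]
      have hkeys : (d.insert x (d.getD x 0 + 1)).keys = d.keys :=
        PySem.Dict.keys_insert_of_contains d _ hc
      refine ⟨by rw [hkeys]; exact hnd, ?_, ?_, ?_⟩
      · rw [hkeys, hso]
        show List.filter _ _ = _
        rw [List.filter_filter]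
        apply List.filter_congr
        intro k hkmem
        rw [PySem.Dict.getD_insert]
        split_ifs with he
        · subst he; simp; omega
        · simp [he]
      · intro y
        show y ∈ PySem.Set.add sm x ↔ _
        rw [PySem.Set.mem_add sm x y, hsm y, hkeys, PySem.Dict.getD_insert]
        split_ifs with he
        · subst he; constructor
          · intro _; exact ⟨hk, by omega⟩
          · intro _; exact Or.inr rfl
        · constructor
          · rintro (h' | h')
            · exact h'
            · exact absurd h' he
          · intro h'; exact Or.inl h'
      · intro y hy
        rw [hkeys] at hy
        rw [PySem.Dict.getD_insert]
        split_ifs with he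
        · omega
        · exact hpos y hy
    · -- first occurrence of x
      have hk : x ∉ d.keys := by
        intro hk
        rcases eq_or_ne (d.getD x 0) 1 with he | he
        · exact honce (by rw [hso]; exact List.mem_filter.2 ⟨hk, by simpa using he⟩)
        · exact hmem ((hsm x).2 ⟨hk, he⟩)
      have hc : d.contains x = false := by
        rw [← Bool.not_eq_true, PySem.Dict.contains_iff_mem_keys d x]; exact hk
      have hsmc : PySem.Set.contains sm x = false := by
        rw [← Bool.not_eq_true, (PySem.Set.contains_iff sm x)]; exact hmem
      have hsoc : PySem.Set.contains so x = false := by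
        rw [← Bool.not_eq_true, (PySem.Set.contains_iff so x)]; exact honce
      have hB : pvStepB (so, sm) x = (PySem.Set.add so x, sm) := by
        unfold pvStepB; simp [hmem, honce]
      have hA : pvStepA d x = d.insert x 1 := by unfold pvStepA; simp [hc]
      rw [hB, hA]
      have hkeys : (d.insert x 1).keys = d.keys ++ [x] :=
        PySem.Dict.keys_insert_of_not_contains d 1 hc
      refine ⟨?_, ?_, ?_, ?_⟩
      · rw [hkeys]
        exact hnd.append (List.nodup_singleton x)
          (fun a ha hax => hk ((List.mem_singleton.mp hax) ▸ ha))
      · show PySem.Set.add so x = _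
        rw [PySem.Set.add_of_not_mem honce, hkeys, List.filter_append, hso]
        congr 1
        · apply List.filter_congr
          intro k hkmem
          rw [PySem.Dict.getD_insert]
          split_ifs with he
          · exact absurd (he ▸ hkmem) hk
          · rfl
        · simp [PySem.Dict.getD_insert_self]
      · intro y
        show y ∈ sm ↔ _
        rw [hkeys, PySem.Dict.getD_insert]
        split_ifs with he
        · subst he; simp [hmem]
        · rw [hsm y]
          simp only [List.mem_append, List.mem_singleton, he, or_false]
      · intro y hy
        rw [hkeys] at hy
        rw [PySem.Dict.getD_insert]
        split_ifs with he
        · omega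
        · rcases List.mem_append.1 hy with h' | h'
          · exact hpos y h'
          · simp only [List.mem_singleton] at h'; exact absurd h' he

lemma pvInv_fold (ws : List String) (d : PySem.Dict String Int) (so sm : PySem.Set String)
    (h : pvInv d so sm) :
    pvInv (ws.foldl pvStepA d) (ws.foldl pvStepB (so, sm)).1 (ws.foldl pvStepB (so, sm)).2 := by
  induction ws generalizing d so sm with
  | nil => exact h
  | cons x ws ih =>
    simp only [List.foldl_cons]
    have hstep := pvInv_step d so sm x h
    have hpair : pvStepB (so, sm) x = ((pvStepB (so, sm) x).1, (pvStepB (so, sm) x).2) := rfl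
    rw [hpair]
    exact ih _ _ _ hstep

-- A's second (filter) loop over a nodup list collects exactly the filtered list
lemma pvFilterLoop (p : String → Bool) :
    ∀ (l : List String) (s : PySem.Set String), l.Nodup → (∀ x ∈ l, x ∉ s) →
    l.foldl (fun (s : PySem.Set String) i => if p i then s.add i else s) s = s ++ l.filter p := by
  intro l
  induction l with
  | nil => intro s _ _; simp
  | cons x l ih =>
    intro s hnd hfresh
    simp only [List.foldl_cons, List.filter_cons]
    by_cases hp : p x
    · rw [if_pos hp, PySem.Set.add_of_not_mem (hfresh x (by simp)), if_pos hp,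
        ih (s ++ [x]) hnd.of_cons]
      · simp
      · intro y hy
        simp only [List.mem_append, List.mem_singleton]
        rintro (h' | h')
        · exact hfresh y (by simp [hy]) h'
        · exact (List.nodup_cons.mp hnd).1 (h' ▸ hy)
    · rw [if_neg hp, if_neg hp, ih s hnd.of_cons]
      intro y hy; exact hfresh y (by simp [hy])

-- ===== VERDICT (by name: the statement is the Claim_ definition above) =====
theorem findSingletonWords_spec : Claim_equal_findSingletonWords := by
  intro text _
  unfold Spec_findSingletonWords
  have hinv0 : pvInv PySem.Dict.empty PySem.Set.empty PySem.Set.empty := by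
    refine ⟨by simp [PySem.Dict.keys, PySem.Dict.empty],
      by simp [PySem.Dict.keys, PySem.Dict.empty, PySem.Set.empty], ?_, ?_⟩
    · intro x; simp [PySem.Set.empty, PySem.Dict.keys, PySem.Dict.empty]
    · intro x hx; simp [PySem.Dict.keys, PySem.Dict.empty] at hx
  obtain ⟨hnd, hso, -, -⟩ :=
    pvInv_fold (PySem.Str.split₀ (PySem.Str.strip text)) PySem.Dict.empty
      PySem.Set.empty PySem.Set.empty hinv0
  show ((PySem.Str.split₀ (PySem.Str.strip text)).foldl pvStepA PySem.Dict.empty).keys.foldl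
      (fun (s : PySem.Set String) i =>
        if ((PySem.Str.split₀ (PySem.Str.strip text)).foldl pvStepA PySem.Dict.empty).getD i 0 == 1
        then s.add i else s)
      PySem.Set.empty
    = ((PySem.Str.split₀ (PySem.Str.strip text)).foldl pvStepB
        (PySem.Set.empty, PySem.Set.empty)).1
  rw [pvFilterLoop
      (fun i =>
        ((PySem.Str.split₀ (PySem.Str.strip text)).foldl pvStepA PySem.Dict.empty).getD i 0 == 1)
      _ PySem.Set.empty hnd (by intro y _ hy; simp [PySem.Set.empty] at hy), hso]
  simp [PySem.Set.empty]
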